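-- pv_equiv track=rewrite | github.com/FatmaElMahdi1000/Learn-to-Code-by-Solving-Problems-Book | Chapter3/.ipynb_checkpoints/Three_Cups-checkpoint.py | cups_moves
-- ===== SOURCE A (Python) =====
-- def cups_moves(moves):
--     ball_location = 1
--     for move in moves:
--         if move == "A" and ball_location == 1:
--             ball_location = 2
--         elif move == "A" and ball_location == 2:
--             ball_location = 1
--         elif move == "B" and ball_location == 2: #to c or A there's a relation between A <-> B , a relation between B <-> C
--             ball_location = 3
--         elif move == "B" and ball_location == 3:
--             ball_location = 2
--         elif move == "C" and ball_location == 3: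
--             ball_location = 1
--         elif move == "C" and ball_location == 1:
--             ball_location = 3
--     return ball_location
-- ===== SOURCE B (Python) =====
-- def cups_moves(moves):
--     # Compose the full permutation start-cup -> final-cup by scanning the moves
--     # BACKWARDS: p[k] = final position of a ball starting under cup k+1 for the
--     # suffix processed so far; a move m prepended to that suffix gives p' = p o t_m.
--     T = {"A": (2, 1, 3), "B": (1, 3, 2), "C": (3, 2, 1)}
--     p = (1, 2, 3)
--     for m in reversed(moves):
--         t = T.get(m)
--         if t is not None:
--             p = (p[t[0] - 1], p[t[1] - 1], p[t[2] - 1])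
--     return p[0]
-- ===== Notes on version B (the rewrite author's own statement) =====
-- stated objective: alternative
-- what changed: B traverses the moves back-to-front composing the full start-cup->final-cup permutation (each recognized move is a transposition composed on the right) and then reads the image of cup 1, instead of A's forward single-ball simulation through a 6-branch state machine.
import Mathlib
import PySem

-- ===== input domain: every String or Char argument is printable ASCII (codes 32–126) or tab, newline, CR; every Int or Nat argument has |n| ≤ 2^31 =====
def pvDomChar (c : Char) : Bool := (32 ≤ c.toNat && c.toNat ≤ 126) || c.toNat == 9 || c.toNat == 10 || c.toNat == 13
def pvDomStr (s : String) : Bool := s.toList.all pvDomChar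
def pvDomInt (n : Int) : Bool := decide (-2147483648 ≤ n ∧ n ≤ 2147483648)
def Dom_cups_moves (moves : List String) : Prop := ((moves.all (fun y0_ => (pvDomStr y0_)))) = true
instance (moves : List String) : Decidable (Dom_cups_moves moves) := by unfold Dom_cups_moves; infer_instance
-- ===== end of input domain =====

-- B composes the whole start->final permutation scanning the moves backwards and reads off
-- the image of cup 1; A simulates the ball forward through a 6-branch state machine.

-- ===== PORT A =====
def cupsStepA (loc : Int) (move : String) : Int :=
  if move = "A" ∧ loc = 1 then 2
  else if move = "A" ∧ loc = 2 then 1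
  else if move = "B" ∧ loc = 2 then 3
  else if move = "B" ∧ loc = 3 then 2
  else if move = "C" ∧ loc = 3 then 1
  else if move = "C" ∧ loc = 1 then 3
  else loc

def cups_moves (moves : List String) : Int :=
  moves.foldl cupsStepA 1

-- ===== PORT B =====
-- T.get(m): first-match association-list lookup, as Source B's dict
def cupsTransTable : List (String × (Int × Int × Int)) :=
  [("A", (2, 1, 3)), ("B", (1, 3, 2)), ("C", (3, 2, 1))]

-- tuple indexing p[k-1]; exact for k ∈ {1,2,3}, the only values stored in the table/permutations
def cupsIdx (p : Int × Int × Int) (k : Int) : Int :=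
  if k = 1 then p.1 else if k = 2 then p.2.1 else p.2.2

-- one step of Source B's loop: p = (p[t[0]-1], p[t[1]-1], p[t[2]-1]) when the move is recognized
def cupsCompose (p : Int × Int × Int) (m : String) : Int × Int × Int :=
  match cupsTransTable.lookup m with
  | none => p
  | some t => (cupsIdx p t.1, cupsIdx p t.2.1, cupsIdx p t.2.2)

def cups_moves_alt (moves : List String) : Int :=
  -- for m in reversed(moves): compose; then return p[0]
  (moves.reverse.foldl cupsCompose (1, 2, 3)).1

-- ===== PRECONDITION & SPEC =====
def Spec_cups_moves (moves : List String) (out : Int) : Prop := out = cups_moves_alt moves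
instance (moves : List String) (out : Int) : Decidable (Spec_cups_moves moves out) := by unfold Spec_cups_moves; infer_instance

-- ===== CLAIM (what is proved, stated in full; the proofs are below) =====
def Claim_equal_cups_moves : Prop := ∀ (moves : List String), Dom_cups_moves moves → Spec_cups_moves moves (cups_moves moves)

-- ===== LEMMAS AND PROOFS =====

-- one composition step, read at k, is one forward A-step from k
theorem cupsCompose_idx (p : Int × Int × Int) (m : String) (k : Int)
    (h : k = 1 ∨ k = 2 ∨ k = 3) :
    cupsIdx (cupsCompose p m) k = cupsIdx p (cupsStepA k m) ∧
      (cupsStepA k m = 1 ∨ cupsStepA k m = 2 ∨ cupsStepA k m = 3) := by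
  rcases h with h | h | h <;> subst h <;>
    cases hma : m == "A" <;> cases hmb : m == "B" <;> cases hmc : m == "C" <;>
    simp only [cupsCompose, cupsTransTable, List.lookup, hma, hmb, hmc] <;>
    simp_all [cupsStepA, cupsIdx]

-- B's reverse fold, read at start position k, equals A's forward fold from k
theorem cups_rev_fold (moves : List String) (k : Int)
    (h : k = 1 ∨ k = 2 ∨ k = 3) :
    cupsIdx (moves.reverse.foldl cupsCompose (1, 2, 3)) k =
      moves.foldl cupsStepA k := by
  induction moves generalizing k with
  | nil => rcases h with h | h | h <;> subst h <;> rfl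
  | cons m ms ih =>
      rw [List.reverse_cons, List.foldl_append]
      obtain ⟨h1, h2⟩ := cupsCompose_idx (ms.reverse.foldl cupsCompose (1, 2, 3)) m k h
      simp only [List.foldl]
      rw [h1, ih _ h2]

-- ===== VERDICT (by name: the statement is the Claim_ definition above) =====
theorem cups_moves_spec : Claim_equal_cups_moves := by
  intro moves _
  show cups_moves moves = cups_moves_alt moves
  have h := cups_rev_fold moves 1 (Or.inl rfl)
  unfold cups_moves cups_moves_alt
  rw [← h]
  rfl
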